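-- pv_equiv track=rewrite | github.com/paulklemstine/L.O.V.E | lovev1/core/reasoning.py | _prioritize_plans
-- ===== SOURCE A (Python) =====
-- from typing import List
--
-- def _prioritize_plans(plans: List[str]) -> List[str]:
--     """
--     Prioritizes a list of strategic commands based on their potential value.
--     """
--     scored_plans = []
--     for plan in plans:
--         score = 0
--         if "talent_scout" in plan: score += 100
--         if "opportunity_scout" in plan: score += 90
--         if plan.startswith("Insight:"): score += 200 # Highest priority
--
--         scored_plans.append((score, plan))
--
--     scored_plans.sort(key=lambda x: x[0], reverse=True)
--     return [plan for score, plan in scored_plans]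
-- ===== SOURCE B (Python) =====
-- from typing import List
--
-- _SCORES = (390, 300, 290, 200, 190, 100, 90, 0)  # every reachable score, descending
--
-- def _score(plan: str) -> int:
--     s = 0
--     if "talent_scout" in plan: s += 100
--     if "opportunity_scout" in plan: s += 90
--     if plan.startswith("Insight:"): s += 200
--     return s
--
-- def _prioritize_plans(plans: List[str]) -> List[str]:
--     # bucket sort: one pass into per-score buckets, then concatenate descending
--     buckets = {s: [] for s in _SCORES}
--     for plan in plans:
--         buckets[_score(plan)].append(plan)
--     out = []
--     for s in _SCORES:
--         out.extend(buckets[s])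
--     return out
-- ===== Notes on version B (the rewrite author's own statement) =====
-- stated objective: alternative
-- what changed: Replaces the stable comparison sort over scored tuples with a bucket sort: one pass drops each plan into one of the 8 possible score buckets, then the buckets are concatenated in descending score order.
import Mathlib
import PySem

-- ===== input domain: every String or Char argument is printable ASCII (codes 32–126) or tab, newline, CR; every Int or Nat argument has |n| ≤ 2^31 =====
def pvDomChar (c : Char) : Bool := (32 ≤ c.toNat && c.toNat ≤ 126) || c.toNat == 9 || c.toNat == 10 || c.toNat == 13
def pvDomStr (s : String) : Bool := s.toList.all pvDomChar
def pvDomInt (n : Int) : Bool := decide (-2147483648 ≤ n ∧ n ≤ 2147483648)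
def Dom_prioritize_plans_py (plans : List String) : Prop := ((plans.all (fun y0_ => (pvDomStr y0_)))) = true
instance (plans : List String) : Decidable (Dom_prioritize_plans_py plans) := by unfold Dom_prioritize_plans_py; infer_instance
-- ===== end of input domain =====

-- B replaces the stable reverse sort by score with a bucket pass over the 8 possible scores (buckets concatenated in descending score order); return values proved equal.

-- ===== PORT A =====
def prioritize_plans_py (plans : List String) : List String :=
  let scored_plans : List (Int × String) :=
    plans.foldl (fun acc plan =>
      let score : Int := 0
      let score := if PySem.Str.isIn "talent_scout" plan then score + 100 else score
      let score := if PySem.Str.isIn "opportunity_scout" plan then score + 90 else score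
      let score := if PySem.Str.startswith plan "Insight:" then score + 200 else score
      acc ++ [(score, plan)]) []
  (PySem.List.sorted scored_plans (fun x => x.1) true).map (fun x => x.2)

-- ===== PORT B =====
-- Source B's _SCORES tuple: every reachable score, descending
def pvScoresList : List Int := [390, 300, 290, 200, 190, 100, 90, 0]

-- Source B's _score helper
def pvScore (plan : String) : Int :=
  let s : Int := 0
  let s := if PySem.Str.isIn "talent_scout" plan then s + 100 else s
  let s := if PySem.Str.isIn "opportunity_scout" plan then s + 90 else s
  let s := if PySem.Str.startswith plan "Insight:" then s + 200 else s
  s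

def prioritize_plans_py_alt (plans : List String) : List String :=
  let buckets : PySem.Dict Int (List String) :=
    pvScoresList.foldl (fun d s => d.insert s []) PySem.Dict.empty
  -- buckets[_score(plan)].append(plan): the key is always present, so modify's default [] is never used
  let buckets := plans.foldl (fun d plan => d.modify (pvScore plan) [] (fun l => l ++ [plan])) buckets
  pvScoresList.foldl (fun out s => out ++ buckets.getD s []) []

-- ===== PRECONDITION & SPEC =====
def Spec_prioritize_plans_py (plans : List String) (out : List String) : Prop := out = prioritize_plans_py_alt plans
instance (plans : List String) (out : List String) : Decidable (Spec_prioritize_plans_py plans out) := by unfold Spec_prioritize_plans_py; infer_instance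

-- ===== CLAIM (what is proved, stated in full; the proofs are below) =====
def Claim_equal_prioritize_plans_py : Prop := ∀ (plans : List String), Dom_prioritize_plans_py plans → Spec_prioritize_plans_py plans (prioritize_plans_py plans)

-- ===== LEMMAS AND PROOFS =====

theorem pv_insertBy_append_left {α : Type} (before : α → α → Bool) (x : α) (l1 l2 : List α)
    (h : ∀ y ∈ l1, before x y = false) :
    PySem.List.insertBy before x (l1 ++ l2) = l1 ++ PySem.List.insertBy before x l2 := by
  induction l1 with
  | nil => simp
  | cons a t ih =>
    simp only [List.cons_append, PySem.List.insertBy, h a (by simp)]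
    simp only [Bool.false_eq_true, if_false]
    rw [ih (fun y hy => h y (by simp [hy]))]

theorem pv_insertBy_of_forall_before {α : Type} (before : α → α → Bool) (x : α) (l : List α)
    (h : ∀ y ∈ l, before x y = true) :
    PySem.List.insertBy before x l = x :: l := by
  cases l with
  | nil => simp [PySem.List.insertBy]
  | cons a t => simp [PySem.List.insertBy, h a (by simp)]

theorem pv_flatMap_congr {α β : Type} (l : List α) (f g : α → List β)
    (h : ∀ a ∈ l, f a = g a) : l.flatMap f = l.flatMap g := by
  induction l with
  | nil => rfl
  | cons a t ih =>
    simp only [List.flatMap_cons, h a (by simp), ih (fun y hy => h y (by simp [hy]))]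

theorem pv_insertBy_flatMap_filter {α : Type} (key : α → Int) (SS : List Int)
    (hSS : SS.Pairwise (· > ·)) (x : α) (hx : key x ∈ SS) (xs : List α) :
    PySem.List.insertBy (fun a b => decide (key b < key a)) x
      (SS.flatMap (fun s => xs.filter (fun y => key y == s)))
    = SS.flatMap (fun s => (xs ++ [x]).filter (fun y => key y == s)) := by
  induction SS with
  | nil => simp at hx
  | cons s SS' ih =>
    have hgt : ∀ s' ∈ SS', s' < s := by
      intro s' h; exact (List.pairwise_cons.mp hSS).1 s' h
    rw [List.flatMap_cons, List.flatMap_cons]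
    by_cases hxs : key x = s
    · -- x goes at the end of the first bucket
      have h1 : ∀ y ∈ xs.filter (fun y => key y == s),
          (fun a b => decide (key b < key a)) x y = false := by
        intro y hy
        have := List.of_mem_filter hy
        simp only [beq_iff_eq] at this
        simp [this, hxs]
      have h2 : ∀ y ∈ SS'.flatMap (fun s => xs.filter (fun y => key y == s)),
          (fun a b => decide (key b < key a)) x y = true := by
        intro y hy
        obtain ⟨s', hs', hy'⟩ := List.mem_flatMap.mp hy
        have := List.of_mem_filter hy'
        simp only [beq_iff_eq] at this
        have := hgt s' hs'
        simp only [decide_eq_true_eq]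
        omega
      rw [pv_insertBy_append_left _ _ _ _ h1, pv_insertBy_of_forall_before _ _ _ h2]
      rw [List.filter_append]
      have hfx : [x].filter (fun y => key y == s) = [x] := by simp [hxs]
      rw [hfx]
      have htail : SS'.flatMap (fun s => (xs ++ [x]).filter (fun y => key y == s))
          = SS'.flatMap (fun s => xs.filter (fun y => key y == s)) := by
        refine pv_flatMap_congr _ _ _ (fun s' hs' => ?_)
        rw [List.filter_append]
        have : [x].filter (fun y => key y == s') = [] := by
          have := hgt s' hs'; simp [hxs]; omega
        simp [this]
      rw [htail]
      simp
    · -- x belongs to a later bucket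
      have hx' : key x ∈ SS' := by
        rcases List.mem_cons.mp hx with h | h
        · exact absurd h hxs
        · exact h
      have hklt : key x < s := hgt _ hx'
      have h1 : ∀ y ∈ xs.filter (fun y => key y == s),
          (fun a b => decide (key b < key a)) x y = false := by
        intro y hy
        have := List.of_mem_filter hy
        simp only [beq_iff_eq] at this
        simp only [decide_eq_false_iff_not, not_lt]
        omega
      rw [pv_insertBy_append_left _ _ _ _ h1,
          ih (List.pairwise_cons.mp hSS).2 hx']
      have hhead : (xs ++ [x]).filter (fun y => key y == s) = xs.filter (fun y => key y == s) := by
        rw [List.filter_append]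
        have : [x].filter (fun y => key y == s) = [] := by simp [hxs]
        simp [this]
      rw [hhead]

theorem pv_sorted_rev_eq_flatMap_filter {α : Type} (key : α → Int) (SS : List Int)
    (hSS : SS.Pairwise (· > ·)) (xs : List α) (hk : ∀ y ∈ xs, key y ∈ SS) :
    PySem.List.sorted xs key true = SS.flatMap (fun s => xs.filter (fun y => key y == s)) := by
  induction xs using List.reverseRecOn with
  | nil => simp [PySem.List.sorted]
  | append_singleton xs x ih =>
    rw [PySem.List.sorted_rev_eq_foldl_insertBy, List.foldl_append]
    simp only [List.foldl_cons, List.foldl_nil]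
    rw [← PySem.List.sorted_rev_eq_foldl_insertBy,
        ih (fun y hy => hk y (by simp [hy]))]
    exact pv_insertBy_flatMap_filter key SS hSS x (hk x (by simp)) xs

theorem pv_score_mem : ∀ p : String, pvScore p ∈ pvScoresList := by
  intro p
  unfold pvScore pvScoresList
  split_ifs <;> decide

-- A's result is the bucket concatenation
theorem pv_A_eq_flatMap (plans : List String) :
    prioritize_plans_py plans
    = pvScoresList.flatMap (fun s => plans.filter (fun p => pvScore p == s)) := by
  show (PySem.List.sorted
      (plans.foldl (fun acc plan => acc ++ [(pvScore plan, plan)]) [])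
      (fun x => x.1) true).map (fun x => x.2)
    = pvScoresList.flatMap (fun s => plans.filter (fun p => pvScore p == s))
  rw [PySem.List.foldl_append_singleton_eq_map (fun plan => (pvScore plan, plan)) plans []]
  rw [List.nil_append]
  rw [pv_sorted_rev_eq_flatMap_filter (fun x : Int × String => x.1) pvScoresList
      (by unfold pvScoresList; decide)
      (plans.map (fun plan => (pvScore plan, plan)))
      (by intro y hy
          obtain ⟨p, _, rfl⟩ := List.mem_map.mp hy
          exact pv_score_mem p)]
  rw [List.map_flatMap]
  refine pv_flatMap_congr _ _ _ (fun s _ => ?_)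
  rw [List.filter_map]
  rw [List.map_map]
  simp [Function.comp_def]

theorem pv_init_getD (SS : List Int) (d : PySem.Dict Int (List String)) (c : Int)
    (h : d.getD c [] = []) :
    (SS.foldl (fun d s => d.insert s []) d).getD c [] = [] := by
  induction SS generalizing d with
  | nil => exact h
  | cons s t ih =>
    simp only [List.foldl_cons]
    refine ih _ ?_
    rw [PySem.Dict.getD_insert]
    split <;> simp [h]

-- B's result is the same bucket concatenation
theorem pv_B_eq_flatMap (plans : List String) :
    prioritize_plans_py_alt plans
    = pvScoresList.flatMap (fun s => plans.filter (fun p => pvScore p == s)) := by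
  unfold prioritize_plans_py_alt
  rw [PySem.List.foldl_append_eq_flatMap, List.nil_append]
  refine pv_flatMap_congr _ _ _ (fun c _hc => ?_)
  have hfold :
      plans.foldl (fun d plan => d.modify (pvScore plan) [] (fun l => l ++ [plan]))
        (pvScoresList.foldl (fun d s => d.insert s []) PySem.Dict.empty)
      = (plans.map (fun plan => (pvScore plan, plan))).foldl
          (fun d p => d.modify p.1 [] (fun l => l ++ [p.2]))
          (pvScoresList.foldl (fun d s => d.insert s []) PySem.Dict.empty) := by
    rw [List.foldl_map]
  rw [hfold, PySem.Dict.getD_foldl_modify_append]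
  rw [pv_init_getD _ _ _ (by rfl), List.nil_append]
  rw [List.filter_map, List.map_map]
  simp [Function.comp_def]

-- ===== VERDICT (by name: the statement is the Claim_ definition above) =====
theorem prioritize_plans_py_spec : Claim_equal_prioritize_plans_py := by
  intro plans _
  unfold Spec_prioritize_plans_py
  rw [pv_A_eq_flatMap, pv_B_eq_flatMap]
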